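-- pv_equiv track=rewrite | github.com/pavlovsvpavel/SoftUni | python_advanced_may_2023/exam_exercises/multidimensional_lists/exit_founder.py | find_exit_traps_walls
-- ===== SOURCE A (Python) =====
-- def find_exit_traps_walls(matrix):
--     exit_position = []
--     traps_pos = []
--     walls_pos = []
--
--     for i in range(len(matrix)):
--         for j in range(len(matrix[i])):
--             if matrix[i][j] == "E":
--                 exit_position.append((i, j))
--             elif matrix[i][j] == "T":
--                 traps_pos.append((i, j))
--             elif matrix[i][j] == "W":
--                 walls_pos.append((i, j))
--
--     return exit_position, traps_pos, walls_pos
-- ===== SOURCE B (Python) =====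
-- def find_exit_traps_walls(matrix):
--     exit_position = [(i, j) for i, row in enumerate(matrix) for j, cell in enumerate(row) if cell == "E"]
--     traps_pos = [(i, j) for i, row in enumerate(matrix) for j, cell in enumerate(row) if cell == "T"]
--     walls_pos = [(i, j) for i, row in enumerate(matrix) for j, cell in enumerate(row) if cell == "W"]
--     return exit_position, traps_pos, walls_pos
-- ===== Notes on version B (the rewrite author's own statement) =====
-- stated objective: idiomatic
-- what changed: Replaces the single index-driven pass with a three-way branch by three independent enumerate-based comprehensions, one full scan per character class.
import Mathlib
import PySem

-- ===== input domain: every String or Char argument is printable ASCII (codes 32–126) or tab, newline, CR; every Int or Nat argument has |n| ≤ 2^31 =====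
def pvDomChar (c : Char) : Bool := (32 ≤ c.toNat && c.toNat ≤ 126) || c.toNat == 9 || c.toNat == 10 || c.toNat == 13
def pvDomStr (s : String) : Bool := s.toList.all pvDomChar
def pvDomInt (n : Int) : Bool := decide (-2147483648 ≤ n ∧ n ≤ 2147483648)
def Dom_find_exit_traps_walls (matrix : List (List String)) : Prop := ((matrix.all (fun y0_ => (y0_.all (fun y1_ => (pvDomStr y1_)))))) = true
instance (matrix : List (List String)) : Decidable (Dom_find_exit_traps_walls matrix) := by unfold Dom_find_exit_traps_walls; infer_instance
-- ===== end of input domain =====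

-- B scans the matrix three times with enumerate-based comprehensions (one pass per character
-- class) instead of A's single index-driven pass with a three-way branch; objective: idiomatic.


-- ===== PORT A =====
-- literal port of A: one pass over index ranges, a three-way branch appends to one of three lists
-- (matrix[i] / matrix[i][j]: indices from range(len(..)) are always in range, so pyGetD with an
-- unreachable default is exact here)
def find_exit_traps_walls (matrix : List (List String)) : (List (Int × Int)) × (List (Int × Int)) × (List (Int × Int)) :=
  (PySem.List.pyRange 0 matrix.length 1).foldl
    (fun st i =>
      (PySem.List.pyRange 0 (PySem.List.pyGetD matrix i []).length 1).foldl
        (fun st2 j =>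
          if PySem.List.pyGetD (PySem.List.pyGetD matrix i []) j "" == "E" then (st2.1 ++ [(i, j)], st2.2.1, st2.2.2)
          else if PySem.List.pyGetD (PySem.List.pyGetD matrix i []) j "" == "T" then (st2.1, st2.2.1 ++ [(i, j)], st2.2.2)
          else if PySem.List.pyGetD (PySem.List.pyGetD matrix i []) j "" == "W" then (st2.1, st2.2.1, st2.2.2 ++ [(i, j)])
          else st2) st)
    ([], [], [])

-- ===== PORT B =====
-- one comprehension of Source B: collect row-major positions of one character
def pvCollect (c : String) (matrix : List (List String)) : List (Int × Int) :=
  (PySem.List.enumerate matrix).flatMap (fun p =>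
    (PySem.List.enumerate p.2).filterMap (fun q => if q.2 == c then some (p.1, q.1) else none))

def find_exit_traps_walls_alt (matrix : List (List String)) : (List (Int × Int)) × (List (Int × Int)) × (List (Int × Int)) :=
  (pvCollect "E" matrix, pvCollect "T" matrix, pvCollect "W" matrix)

-- ===== PRECONDITION & SPEC =====
def Spec_find_exit_traps_walls (matrix : List (List String)) (out : (List (Int × Int)) × (List (Int × Int)) × (List (Int × Int))) : Prop := out = find_exit_traps_walls_alt matrix
instance (matrix : List (List String)) (out : (List (Int × Int)) × (List (Int × Int)) × (List (Int × Int))) : Decidable (Spec_find_exit_traps_walls matrix out) := by unfold Spec_find_exit_traps_walls; infer_instance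

-- ===== CLAIM (what is proved, stated in full; the proofs are below) =====
def Claim_equal_find_exit_traps_walls : Prop := ∀ (matrix : List (List String)), Dom_find_exit_traps_walls matrix → Spec_find_exit_traps_walls matrix (find_exit_traps_walls matrix)

-- ===== LEMMAS AND PROOFS =====

-- an index loop 'for j in range(len(xs)): … j, xs[j] …' is a fold over enumerate xs
theorem pv_foldl_pyRange_enum {α β : Type} (d : α) (f : β → Int → α → β) :
    ∀ (suf pre : List α) (init : β),
      (PySem.List.pyRange (pre.length : Int) ((pre ++ suf).length : Int) 1).foldl
          (fun acc j => f acc j (PySem.List.pyGetD (pre ++ suf) j d)) init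
        = (PySem.List.enumerate suf (pre.length : Int)).foldl (fun acc p => f acc p.1 p.2) init := by
  intro suf
  induction suf with
  | nil =>
      intro pre init
      simp [PySem.List.pyRange_one_eq_nil le_rfl, PySem.List.enumerate]
  | cons a suf ih =>
      intro pre init
      have hlt : (pre.length : Int) < ((pre ++ a :: suf).length : Int) := by
        have h : pre.length < (pre ++ a :: suf).length := by
          simp only [List.length_append, List.length_cons]; omega
        exact_mod_cast h
      rw [PySem.List.pyRange_one_cons hlt, PySem.List.enumerate_cons]
      simp only [List.foldl_cons]
      have hget : PySem.List.pyGetD (pre ++ a :: suf) (pre.length : Int) d = a := by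
        rw [PySem.List.pyGetD_natCast, List.getD, List.getElem?_append_right (le_refl _)]
        simp
      rw [hget]
      have h2 := ih (pre ++ [a]) (f init (pre.length : Int) a)
      have e1 : ((pre ++ [a]).length : Int) = (pre.length : Int) + 1 := by
        simp
      have e2 : (pre ++ [a]) ++ suf = pre ++ a :: suf := by
        simp
      rw [e1, e2] at h2
      exact h2

-- A's inner loop over one row appends that row's three position lists to the state
theorem pv_inner_split (i : Int) :
    ∀ (l : List (Int × String)) (st : (List (Int × Int)) × (List (Int × Int)) × (List (Int × Int))),
      l.foldl
          (fun st2 q =>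
            if q.2 == "E" then (st2.1 ++ [(i, q.1)], st2.2.1, st2.2.2)
            else if q.2 == "T" then (st2.1, st2.2.1 ++ [(i, q.1)], st2.2.2)
            else if q.2 == "W" then (st2.1, st2.2.1, st2.2.2 ++ [(i, q.1)])
            else st2) st
        = (st.1 ++ l.filterMap (fun q => if q.2 == "E" then some (i, q.1) else none),
           st.2.1 ++ l.filterMap (fun q => if q.2 == "T" then some (i, q.1) else none),
           st.2.2 ++ l.filterMap (fun q => if q.2 == "W" then some (i, q.1) else none)) := by
  intro l
  induction l with
  | nil => intro st; simp
  | cons q l ih =>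
      intro st
      simp only [List.foldl_cons, List.filterMap_cons]
      by_cases hE : q.2 == "E"
      · rw [if_pos hE, ih]
        have hq : q.2 = "E" := by simpa using hE
        simp [hq, List.append_assoc]
      · rw [if_neg hE]
        by_cases hT : q.2 == "T"
        · rw [if_pos hT, ih]
          have hq : q.2 = "T" := by simpa using hT
          simp [hq, List.append_assoc]
        · rw [if_neg hT]
          by_cases hW : q.2 == "W"
          · rw [if_pos hW, ih]
            have hq : q.2 = "W" := by simpa using hW
            simp [hq, List.append_assoc]
          · rw [if_neg hW, ih]
            simp [hE, hT, hW]

-- A's outer loop (in enumerate form) appends the flatMap of all rows' position lists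
theorem pv_outer_split :
    ∀ (m : List (Int × List String)) (st : (List (Int × Int)) × (List (Int × Int)) × (List (Int × Int))),
      m.foldl
          (fun st p =>
            (PySem.List.enumerate p.2).foldl
              (fun st2 q =>
                if q.2 == "E" then (st2.1 ++ [(p.1, q.1)], st2.2.1, st2.2.2)
                else if q.2 == "T" then (st2.1, st2.2.1 ++ [(p.1, q.1)], st2.2.2)
                else if q.2 == "W" then (st2.1, st2.2.1, st2.2.2 ++ [(p.1, q.1)])
                else st2) st) st
        = (st.1 ++ m.flatMap (fun p => (PySem.List.enumerate p.2).filterMap (fun q => if q.2 == "E" then some (p.1, q.1) else none)),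
           st.2.1 ++ m.flatMap (fun p => (PySem.List.enumerate p.2).filterMap (fun q => if q.2 == "T" then some (p.1, q.1) else none)),
           st.2.2 ++ m.flatMap (fun p => (PySem.List.enumerate p.2).filterMap (fun q => if q.2 == "W" then some (p.1, q.1) else none))) := by
  intro m
  induction m with
  | nil => intro st; simp
  | cons p m ih =>
      intro st
      simp only [List.foldl_cons, List.flatMap_cons]
      rw [pv_inner_split p.1, ih]
      simp [List.append_assoc]

-- ===== VERDICT (by name: the statement is the Claim_ definition above) =====
theorem find_exit_traps_walls_spec : Claim_equal_find_exit_traps_walls := by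
  intro matrix _
  show find_exit_traps_walls matrix = find_exit_traps_walls_alt matrix
  unfold find_exit_traps_walls find_exit_traps_walls_alt pvCollect
  have houter := pv_foldl_pyRange_enum ([] : List String)
    (fun (st : (List (Int × Int)) × (List (Int × Int)) × (List (Int × Int))) i row =>
      (PySem.List.pyRange 0 row.length 1).foldl
        (fun st2 j =>
          if PySem.List.pyGetD row j "" == "E" then (st2.1 ++ [(i, j)], st2.2.1, st2.2.2)
          else if PySem.List.pyGetD row j "" == "T" then (st2.1, st2.2.1 ++ [(i, j)], st2.2.2)
          else if PySem.List.pyGetD row j "" == "W" then (st2.1, st2.2.1, st2.2.2 ++ [(i, j)])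
          else st2) st)
    matrix [] ([], [], [])
  simp only [List.nil_append, List.length_nil, Nat.cast_zero] at houter
  refine Eq.trans houter ?_
  have hinner : ∀ (st : (List (Int × Int)) × (List (Int × Int)) × (List (Int × Int)))
      (p : Int × List String),
      (PySem.List.pyRange 0 p.2.length 1).foldl
        (fun st2 j =>
          if PySem.List.pyGetD p.2 j "" == "E" then (st2.1 ++ [(p.1, j)], st2.2.1, st2.2.2)
          else if PySem.List.pyGetD p.2 j "" == "T" then (st2.1, st2.2.1 ++ [(p.1, j)], st2.2.2)
          else if PySem.List.pyGetD p.2 j "" == "W" then (st2.1, st2.2.1, st2.2.2 ++ [(p.1, j)])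
          else st2) st
      = (PySem.List.enumerate p.2).foldl
        (fun st2 q =>
          if q.2 == "E" then (st2.1 ++ [(p.1, q.1)], st2.2.1, st2.2.2)
          else if q.2 == "T" then (st2.1, st2.2.1 ++ [(p.1, q.1)], st2.2.2)
          else if q.2 == "W" then (st2.1, st2.2.1, st2.2.2 ++ [(p.1, q.1)])
          else st2) st := by
    intro st p
    have h := pv_foldl_pyRange_enum ("" : String)
      (fun (st2 : (List (Int × Int)) × (List (Int × Int)) × (List (Int × Int))) j c =>
        if c == "E" then (st2.1 ++ [(p.1, j)], st2.2.1, st2.2.2)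
        else if c == "T" then (st2.1, st2.2.1 ++ [(p.1, j)], st2.2.2)
        else if c == "W" then (st2.1, st2.2.1, st2.2.2 ++ [(p.1, j)])
        else st2)
      p.2 [] st
    simp only [List.nil_append, List.length_nil, Nat.cast_zero] at h
    exact h
  refine Eq.trans (List.foldl_ext _ _ ([], [], []) (fun st p _ => hinner st p)) ?_
  refine Eq.trans (pv_outer_split (PySem.List.enumerate matrix) ([], [], [])) ?_
  simp
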